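-- pv_equiv track=rewrite | github.com/Xuanfang1121/bert_bilstm_crf_ner | bert_bilstm_crf_ner/processing_predict_bio_label.py | processing_general_format_bxx
-- ===== SOURCE A (Python) =====
-- def processing_general_format_bxx(pred_label):
--     """
--        修改: 'B-X', 'B-X', 'B-X'
--
--        为：
--           'B-X', 'I-X', 'I-X'
--
--     """
--     index_list = []
--     for i in range(1, len(pred_label)):
--         if pred_label[i] == pred_label[i-1] and 'B-' in pred_label[i]:
--             start_index = i - 1
--             end_index = i
--             for j in range(start_index+1, len(pred_label)):
--                 if pred_label[j] == pred_label[i]: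
--                     end_index = j
--                 else:
--                     break
--
--             if end_index > start_index:
--                 index_list.append([start_index, end_index])
--
--     if len(index_list) > 0:
--         for iterm in index_list:
--             # _, tag = pred_label[iterm[0]].split('-')
--             # for i in range(iterm[0] + 1, iterm[1]+1):
--             #     pred_label[i] = 'I-' + tag
--             temp = pred_label[iterm[0]].split('-')
--             if len(temp) == 2:
--                 for i in range(iterm[0] + 1, iterm[1] + 1):
--                     pred_label[i] = 'I-' + temp[1]
--             elif len(temp) == 3:
--                 for i in range(iterm[0] + 1, iterm[1] + 1):
--                     pred_label[i] = 'I-' + temp[1] + "-" + temp[2]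
--
--     return pred_label
-- ===== SOURCE B (Python) =====
-- def processing_general_format_bxx(pred_label):
--     """Single pass: a label equal to its original predecessor and containing
--     'B-' is rewritten in place to 'I-' + everything after its first hyphen
--     (only when it has exactly one or two hyphens, as in the original)."""
--     prev = None
--     for i in range(len(pred_label)):
--         lab = pred_label[i]
--         if i > 0 and lab == prev and 'B-' in lab:
--             parts = lab.split('-')
--             if len(parts) in (2, 3):
--                 pred_label[i] = 'I-' + '-'.join(parts[1:])
--         prev = lab
--     return pred_label
-- ===== Notes on version B (the rewrite author's own statement) =====
-- stated objective: alternative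
-- what changed: A scans every repeated 'B-' label, re-walks the rest of the list to find the run end for each one, collects overlapping [start,end] intervals and then rewrites each interval range in a second phase; B is a single pass that rewrites a label in place to 'I-'+suffix exactly when it equals its original predecessor and contains 'B-'.
import Mathlib
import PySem

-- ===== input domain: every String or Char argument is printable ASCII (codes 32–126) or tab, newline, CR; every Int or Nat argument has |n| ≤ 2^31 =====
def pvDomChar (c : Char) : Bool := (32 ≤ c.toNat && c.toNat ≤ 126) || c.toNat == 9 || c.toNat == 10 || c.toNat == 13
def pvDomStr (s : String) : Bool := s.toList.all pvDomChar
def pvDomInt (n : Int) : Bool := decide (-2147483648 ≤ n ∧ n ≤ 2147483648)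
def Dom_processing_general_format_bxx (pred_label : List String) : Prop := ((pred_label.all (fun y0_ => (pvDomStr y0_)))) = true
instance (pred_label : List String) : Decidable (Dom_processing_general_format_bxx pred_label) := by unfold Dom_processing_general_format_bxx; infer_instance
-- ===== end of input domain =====

-- B replaces A's scan-and-collect-intervals-then-rewrite with a single pass that
-- compares each label to its original predecessor (objective: alternative).
-- Both Pythons mutate pred_label in place and return it; the ports model the return value.


-- ===== PORT A =====
-- inner 'for j in range(start_index+1, len(pred_label))' with break; e0 is end_index
def pvAInner (L : List String) (target : String) (e0 : Int) : List Int → Int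
  | [] => e0
  | j :: js => if PySem.List.pyGetD L j "" == target then pvAInner L target j js else e0

-- first loop: collect index_list
def pvAPhase1 (L : List String) : List (Int × Int) :=
  (PySem.List.pyRange 1 (L.length : Int) 1).foldl (fun acc i =>
    if PySem.List.pyGetD L i "" == PySem.List.pyGetD L (i-1) ""
        && PySem.Str.isIn "B-" (PySem.List.pyGetD L i "") then
      let start_index := i - 1
      let end_index := pvAInner L (PySem.List.pyGetD L i "") i
        (PySem.List.pyRange (start_index + 1) (L.length : Int) 1)
      if start_index < end_index then acc ++ [(start_index, end_index)] else acc
    else acc) []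

-- 'for i in range(iterm[0]+1, iterm[1]+1): pred_label[i] = v'
def pvASetRange (v : String) (js : List Int) (cur : List String) : List String :=
  js.foldl (fun c j => PySem.List.pySetD c j v) cur

-- body of the rewriting loop over index_list ('I-' + … built at char level, exact)
def pvAPhase2Step (cur : List String) (iv : Int × Int) : List String :=
  let temp := PySem.Chars.splitOn (PySem.List.pyGetD cur iv.1 "").toList ['-']
  if temp.length = 2 then
    pvASetRange (String.ofList (['I', '-'] ++ temp.getD 1 []))
      (PySem.List.pyRange (iv.1 + 1) (iv.2 + 1) 1) cur
  else if temp.length = 3 then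
    pvASetRange (String.ofList (['I', '-'] ++ temp.getD 1 [] ++ ['-'] ++ temp.getD 2 []))
      (PySem.List.pyRange (iv.1 + 1) (iv.2 + 1) 1) cur
  else cur

def processing_general_format_bxx (pred_label : List String) : List String :=
  let index_list := pvAPhase1 pred_label
  if 0 < index_list.length then index_list.foldl pvAPhase2Step pred_label else pred_label

-- ===== PORT B =====
-- 'parts = lab.split('-'); if len(parts) in (2,3): 'I-' + '-'.join(parts[1:])'
def pvBRew (x : String) : String :=
  let parts := PySem.Chars.splitOn x.toList ['-']
  if parts.length = 2 ∨ parts.length = 3 then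
    String.ofList (['I', '-'] ++ PySem.Chars.join ['-'] (parts.drop 1))
  else x

-- the single pass, carrying the ORIGINAL predecessor label
def pvBGo (prev : Option String) : List String → List String
  | [] => []
  | x :: t => (if (some x == prev) && PySem.Str.isIn "B-" x then pvBRew x else x) :: pvBGo (some x) t

def processing_general_format_bxx_alt (pred_label : List String) : List String :=
  pvBGo none pred_label

-- ===== PRECONDITION & SPEC =====
def Spec_processing_general_format_bxx (pred_label : List String) (out : List String) : Prop := out = processing_general_format_bxx_alt pred_label
instance (pred_label : List String) (out : List String) : Decidable (Spec_processing_general_format_bxx pred_label out) := by unfold Spec_processing_general_format_bxx; infer_instance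

-- ===== CLAIM (what is proved, stated in full; the proofs are below) =====
def Claim_equal_processing_general_format_bxx : Prop := ∀ (pred_label : List String), Dom_processing_general_format_bxx pred_label → Spec_processing_general_format_bxx pred_label (processing_general_format_bxx pred_label)

-- ===== LEMMAS AND PROOFS =====

-- structural model of s.split('-')
def pvSplit : List Char → List (List Char)
  | [] => [[]]
  | c :: rest => if c = '-' then [] :: pvSplit rest else (pvSplit rest).modifyHead (c :: ·)

lemma pvSplit_ne_nil (cs : List Char) : pvSplit cs ≠ [] := by
  induction cs with
  | nil => simp [pvSplit]
  | cons c rest ih =>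
    simp only [pvSplit]
    split_ifs
    · simp
    · cases h : pvSplit rest with
      | nil => exact absurd h ih
      | cons a t => simp

lemma pvSplitOn_go (fuel : Nat) : ∀ (l cur : List Char) (acc : List (List Char)),
    l.length < fuel →
    PySem.Chars.splitOn.go ['-'] fuel l cur acc
      = acc.reverse ++ (pvSplit l).modifyHead (cur.reverse ++ ·) := by
  induction fuel with
  | zero => intro l cur acc h; omega
  | succ fuel ih =>
    intro l cur acc h
    cases l with
    | nil => simp [PySem.Chars.splitOn.go, pvSplit]
    | cons c rest =>
      simp only [PySem.Chars.splitOn.go]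
      by_cases hc : c = '-'
      · subst hc
        have hpre : List.isPrefixOf ['-'] ('-' :: rest) = true := by simp [List.isPrefixOf]
        rw [if_pos hpre, ih _ _ _ (by simp at h ⊢; omega)]
        cases hr : pvSplit rest with
        | nil => exact absurd hr (pvSplit_ne_nil rest)
        | cons a t => simp [pvSplit, hr]
      · have hpre : List.isPrefixOf ['-'] (c :: rest) = false := by
          simp [List.isPrefixOf]; exact fun hh => absurd hh.symm hc
        rw [if_neg (by simp [hpre])]
        rw [ih _ _ _ (by simp at h ⊢; omega)]
        simp only [pvSplit, if_neg hc]
        cases hr : pvSplit rest with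
        | nil => exact absurd hr (pvSplit_ne_nil rest)
        | cons a t => simp

lemma pvSplitOn_eq (cs : List Char) : PySem.Chars.splitOn cs ['-'] = pvSplit cs := by
  unfold PySem.Chars.splitOn
  rw [pvSplitOn_go _ _ _ _ (by omega)]
  cases h : pvSplit cs with
  | nil => exact absurd h (pvSplit_ne_nil cs)
  | cons a t => simp

lemma pvSplit_dashfree {cs : List Char} (p : List Char) (hp : p ∈ pvSplit cs) : '-' ∉ p := by
  induction cs generalizing p with
  | nil => simp [pvSplit] at hp; simp [hp]
  | cons c rest ih =>
    simp only [pvSplit] at hp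
    split_ifs at hp with hc
    · rcases List.mem_cons.mp hp with rfl | hp
      · simp
      · exact ih p hp
    · cases hr : pvSplit rest with
      | nil => exact absurd hr (pvSplit_ne_nil rest)
      | cons a t =>
        rw [hr] at hp
        simp only [List.modifyHead] at hp
        rcases List.mem_cons.mp hp with rfl | hp
        · intro hm
          rcases List.mem_cons.mp hm with rfl | hm
          · exact hc rfl
          · exact ih a (by rw [hr]; exact List.mem_cons_self) hm
        · exact ih p (by rw [hr]; exact List.mem_cons_of_mem _ hp)

lemma pvSplit_of_dashfree {cs : List Char} (h : '-' ∉ cs) : pvSplit cs = [cs] := by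
  induction cs with
  | nil => rfl
  | cons c rest ih =>
    have hc : c ≠ '-' := fun hh => h (by simp [hh])
    simp only [pvSplit, if_neg hc, ih (fun hm => h (List.mem_cons_of_mem _ hm))]
    rfl

lemma pvSplit_append_dash {b : List Char} (w : List Char) (hb : '-' ∉ b) :
    pvSplit (b ++ '-' :: w) = b :: pvSplit w := by
  induction b with
  | nil => simp [pvSplit]
  | cons c rest ih =>
    have hc : c ≠ '-' := fun hh => hb (by simp [hh])
    simp only [List.cons_append, pvSplit, if_neg hc,
      ih (fun hm => hb (List.mem_cons_of_mem _ hm))]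
    rfl

-- the written value, as a function of the label
def pvRewCore (x : String) : String :=
  String.ofList (['I', '-'] ++ PySem.Chars.join ['-'] ((PySem.Chars.splitOn x.toList ['-']).drop 1))

abbrev pvGate (x : String) : Prop :=
  (PySem.Chars.splitOn x.toList ['-']).length = 2 ∨ (PySem.Chars.splitOn x.toList ['-']).length = 3

-- split of the rewritten label: same shape, and rewriting is idempotent
lemma pvSplit_rewCore {x : String} (h : pvGate x) :
    PySem.Chars.splitOn (pvRewCore x).toList ['-']
      = ['I'] :: (PySem.Chars.splitOn x.toList ['-']).drop 1 := by
  rcases h with h2 | h3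
  · obtain ⟨a, b, hab⟩ := List.length_eq_two.mp h2
    have hb : '-' ∉ b := pvSplit_dashfree b (by rw [← pvSplitOn_eq, hab]; simp)
    simp only [pvRewCore, hab, PySem.Chars.join]
    rw [pvSplitOn_eq] at hab
    simp only [List.drop_succ_cons, List.drop_zero]
    have hj1 : List.intercalate ['-'] [b] = b := by simp [List.intercalate, List.intersperse]
    rw [hj1]
    have : (String.ofList (['I', '-'] ++ b)).toList = ['I', '-'] ++ b := by simp
    rw [this, pvSplitOn_eq]
    show pvSplit ('I' :: '-' :: b) = _
    simp only [pvSplit, if_neg (by decide : ¬ ('I' = '-')),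
      pvSplit_of_dashfree hb, List.modifyHead]
    simp
  · obtain ⟨a, b, c, habc⟩ := List.length_eq_three.mp h3
    have hb : '-' ∉ b := pvSplit_dashfree b (by rw [← pvSplitOn_eq, habc]; simp)
    simp only [pvRewCore, habc, PySem.Chars.join]
    simp only [List.drop_succ_cons, List.drop_zero]
    have hj : List.intercalate ['-'] [b, c] = b ++ '-' :: c := by
      simp [List.intercalate, List.intersperse]
    rw [hj]
    have : (String.ofList (['I', '-'] ++ (b ++ '-' :: c))).toList = 'I' :: '-' :: (b ++ '-' :: c) := by simp
    rw [this, pvSplitOn_eq]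
    have hc : '-' ∉ c := pvSplit_dashfree c (by rw [← pvSplitOn_eq, habc]; simp)
    simp only [pvSplit, if_neg (by decide : ¬ ('I' = '-')),
      pvSplit_append_dash c hb, pvSplit_of_dashfree hc, List.modifyHead]
    simp



lemma pvBRew_eq (x : String) : pvBRew x = if pvGate x then pvRewCore x else x := by
  rfl

-- elementwise view of the original list (Nat index)
def pvAt (L : List String) (k : Nat) : String := L.getD k ""

-- "position k gets rewritten": the single-pass condition on the ORIGINAL list
def pvHit (L : List String) (k : Nat) : Prop :=
  0 < k ∧ k < L.length ∧ pvAt L k = pvAt L (k - 1) ∧ PySem.Str.isIn "B-" (pvAt L k) = true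

-- B: length and pointwise characterisation
lemma pvBGo_length (t : List String) (prev : Option String) : (pvBGo prev t).length = t.length := by
  induction t generalizing prev with
  | nil => rfl
  | cons x tt ih => simp [pvBGo, ih]

lemma pvBGo_getD (t : List String) : ∀ (prev : Option String) (k : Nat), k < t.length →
    pvAt (pvBGo prev t) k
      = (if (some (pvAt t k) == (if k = 0 then prev else some (pvAt t (k - 1))))
            && PySem.Str.isIn "B-" (pvAt t k) then pvBRew (pvAt t k) else pvAt t k) := by
  induction t with
  | nil => intro prev k hk; simp at hk
  | cons x tt ih =>
    intro prev k hk
    cases k with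
    | zero => simp [pvBGo, pvAt]
    | succ k =>
      have hLHS : pvAt (pvBGo prev (x :: tt)) (k + 1) = pvAt (pvBGo (some x) tt) k := by
        simp [pvBGo, pvAt]
      rw [hLHS, ih (some x) k (by simpa using hk)]
      have h1 : pvAt (x :: tt) (k + 1) = pvAt tt k := by simp [pvAt]
      have h2 : pvAt (x :: tt) (k + 1 - 1) = if k = 0 then x else pvAt tt (k - 1) := by
        cases k with
        | zero => simp [pvAt]
        | succ m => simp [pvAt]
      rw [h1, h2]
      by_cases hk0 : k = 0 <;> simp [hk0]

lemma pvAlt_length (L : List String) : (processing_general_format_bxx_alt L).length = L.length := by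
  simp [processing_general_format_bxx_alt, pvBGo_length]

lemma pvAlt_getD (L : List String) (k : Nat) (hk : k < L.length) :
    (pvHit L k → pvGate (pvAt L k) → pvAt (processing_general_format_bxx_alt L) k = pvRewCore (pvAt L k))
    ∧ (pvHit L k → ¬ pvGate (pvAt L k) → pvAt (processing_general_format_bxx_alt L) k = pvAt L k)
    ∧ (¬ pvHit L k → pvAt (processing_general_format_bxx_alt L) k = pvAt L k) := by
  have hchar := pvBGo_getD L none k hk
  simp only [processing_general_format_bxx_alt]
  cases k with
  | zero =>
    refine ⟨fun hh _ => absurd hh.1 (by omega), fun hh _ => absurd hh.1 (by omega), fun _ => ?_⟩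
    rw [if_pos rfl] at hchar
    have hfalse : (some (pvAt L 0) == (none : Option String)) = false := rfl
    rw [hfalse, Bool.false_and] at hchar
    simp only [Bool.false_eq_true, if_false] at hchar
    exact hchar
  | succ m =>
    rw [if_neg (Nat.succ_ne_zero m)] at hchar
    by_cases hcond : pvAt L (m + 1) = pvAt L (m + 1 - 1) ∧ PySem.Str.isIn "B-" (pvAt L (m + 1)) = true
    · have hb : ((some (pvAt L (m + 1)) == some (pvAt L (m + 1 - 1)))
          && PySem.Str.isIn "B-" (pvAt L (m + 1))) = true := by
        rw [Bool.and_eq_true]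
        exact ⟨beq_iff_eq.mpr (congrArg some hcond.1), hcond.2⟩
      rw [hb, if_pos rfl] at hchar
      refine ⟨fun _ hg => ?_, fun _ hg => ?_, fun hnh => ?_⟩
      · rw [hchar, pvBRew_eq, if_pos hg]
      · rw [hchar, pvBRew_eq, if_neg hg]
      · exact absurd ⟨Nat.succ_pos m, hk, hcond.1, hcond.2⟩ hnh
    · have hb : ((some (pvAt L (m + 1)) == some (pvAt L (m + 1 - 1)))
          && PySem.Str.isIn "B-" (pvAt L (m + 1))) = false := by
        rcases not_and_or.mp hcond with h1 | h2
        · simp only [Bool.and_eq_false_iff, beq_eq_false_iff_ne, ne_eq, Option.some.injEq]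
          exact Or.inl h1
        · simp only [Bool.and_eq_false_iff]
          exact Or.inr (eq_false_of_ne_true h2)
      rw [hb] at hchar
      simp only [Bool.false_eq_true, if_false] at hchar
      exact ⟨fun hh _ => absurd ⟨hh.2.2.1, hh.2.2.2⟩ hcond,
             fun hh _ => hchar, fun _ => hchar⟩

lemma pvAt_pyGetD (L : List String) (i : Int) (h : 0 ≤ i) :
    PySem.List.pyGetD L i "" = pvAt L i.toNat := by
  rw [PySem.List.pyGetD_of_nonneg _ _ h]; rfl

-- A, phase 1: the inner scan
lemma pvAInner_spec (L : List String) (target : String) :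
    ∀ (m : Nat) (a e0 : Int), ((L.length : Int) - a).toNat = m →
    pvAInner L target e0 (PySem.List.pyRange a (L.length : Int) 1) = e0
    ∨ (a ≤ pvAInner L target e0 (PySem.List.pyRange a (L.length : Int) 1)
       ∧ pvAInner L target e0 (PySem.List.pyRange a (L.length : Int) 1) < (L.length : Int)
       ∧ ∀ k : Int, a ≤ k → k ≤ pvAInner L target e0 (PySem.List.pyRange a (L.length : Int) 1) →
           PySem.List.pyGetD L k "" = target) := by
  intro m
  induction m with
  | zero =>
    intro a e0 hm
    rw [PySem.List.pyRange_one_eq_nil (by omega)]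
    simp [pvAInner]
  | succ m ih =>
    intro a e0 hm
    rw [PySem.List.pyRange_one_cons (by omega)]
    by_cases hbeq : (PySem.List.pyGetD L a "" == target) = true
    · simp only [pvAInner, if_pos hbeq]
      have heq : PySem.List.pyGetD L a "" = target := beq_iff_eq.mp hbeq
      rcases ih (a + 1) a (by omega) with h0 | ⟨h1, h2, h3⟩
      · rw [h0]
        exact Or.inr ⟨le_refl a, by omega, fun k hk1 hk2 => by
          have : k = a := by omega
          rw [this]; exact heq⟩
      · refine Or.inr ⟨by omega, h2, fun k hk1 hk2 => ?_⟩
        by_cases hka : k = a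
        · rw [hka]; exact heq
        · exact h3 k (by omega) hk2
    · simp [pvAInner, hbeq]

-- A, phase 1: closed form
lemma pvAPhase1_eq (L : List String) :
    pvAPhase1 L = ((PySem.List.pyRange 1 (L.length : Int) 1).filter (fun i =>
        PySem.List.pyGetD L i "" == PySem.List.pyGetD L (i-1) ""
          && PySem.Str.isIn "B-" (PySem.List.pyGetD L i ""))).map (fun i =>
      (i - 1, pvAInner L (PySem.List.pyGetD L i "") i (PySem.List.pyRange i (L.length : Int) 1))) := by
  unfold pvAPhase1
  rw [PySem.List.foldl_congr_mem _ _
      (fun acc i => if (PySem.List.pyGetD L i "" == PySem.List.pyGetD L (i-1) ""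
          && PySem.Str.isIn "B-" (PySem.List.pyGetD L i "")) then
        acc ++ [(i - 1, pvAInner L (PySem.List.pyGetD L i "") i (PySem.List.pyRange i (L.length : Int) 1))]
      else acc) []
      (by
        intro acc i hi
        dsimp only
        have hi' := PySem.List.mem_pyRange_one.mp hi
        by_cases hc : (PySem.List.pyGetD L i "" == PySem.List.pyGetD L (i-1) ""
            && PySem.Str.isIn "B-" (PySem.List.pyGetD L i "")) = true
        · rw [if_pos hc, if_pos hc]
          have h11 : i - 1 + 1 = i := by omega
          rw [h11]
          rcases pvAInner_spec L (PySem.List.pyGetD L i "") ((L.length : Int) - i).toNat i i rfl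
            with h0 | ⟨h1, _, _⟩
          · rw [if_pos (by rw [h0]; omega)]
          · rw [if_pos (by omega)]
        · rw [if_neg hc, if_neg hc])]
  exact PySem.List.foldl_append_if _ _ _ []

-- properties of every collected interval
def pvIvProps (L : List String) (iv : Int × Int) : Prop :=
  0 ≤ iv.1 ∧ iv.1 + 1 ≤ iv.2 ∧ iv.2 < (L.length : Int)
  ∧ (∀ k : Int, iv.1 ≤ k → k ≤ iv.2 → PySem.List.pyGetD L k "" = PySem.List.pyGetD L iv.1 "")
  ∧ PySem.Str.isIn "B-" (PySem.List.pyGetD L iv.1 "") = true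

lemma pvAPhase1_props (L : List String) : ∀ iv ∈ pvAPhase1 L, pvIvProps L iv := by
  intro iv hiv
  rw [pvAPhase1_eq] at hiv
  obtain ⟨i, hifil, rfl⟩ := List.mem_map.mp hiv
  obtain ⟨hir, hcond⟩ := List.mem_filter.mp hifil
  have hi' := PySem.List.mem_pyRange_one.mp hir
  obtain ⟨hbeq, hisin⟩ := Bool.and_eq_true_iff.mp hcond
  have heq : PySem.List.pyGetD L i "" = PySem.List.pyGetD L (i-1) "" := beq_iff_eq.mp hbeq
  have hP2aux : ∀ E : Int, i ≤ E → (∀ k : Int, i ≤ k → k ≤ E → PySem.List.pyGetD L k "" = PySem.List.pyGetD L i "") →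
      ∀ k : Int, i - 1 ≤ k → k ≤ E → PySem.List.pyGetD L k "" = PySem.List.pyGetD L (i-1) "" := by
    intro E hE hall k hk1 hk2
    by_cases hki : k = i - 1
    · rw [hki]
    · rw [hall k (by omega) hk2, heq]
  rcases pvAInner_spec L (PySem.List.pyGetD L i "") ((L.length : Int) - i).toNat i i rfl
    with h0 | ⟨h1, h2, h3⟩
  · rw [h0]
    refine ⟨by omega, by omega, by omega, ?_, ?_⟩
    · exact hP2aux i le_rfl (fun k hk1 hk2 => by rw [show k = i by omega]) 
    · rw [show (i - 1, i).1 = i - 1 from rfl, ← heq]; exact hisin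
  · refine ⟨by omega, by omega, h2, ?_, ?_⟩
    · exact hP2aux _ h1 h3
    · rw [show (i - 1, pvAInner L (PySem.List.pyGetD L i "") i (PySem.List.pyRange i (L.length : Int) 1)).1 = i - 1 from rfl, ← heq]
      exact hisin

-- coverage: every hit position is inside a collected interval starting just before it
lemma pvAPhase1_cover (L : List String) (k : Nat) (hk : pvHit L k) :
    ∃ iv ∈ pvAPhase1 L, iv.1 = (k : Int) - 1 ∧ (k : Int) ≤ iv.2 := by
  obtain ⟨hk0, hkn, hkeq, hkin⟩ := hk
  have hc1 : ((k : Int)) ∈ PySem.List.pyRange 1 (L.length : Int) 1 :=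
    PySem.List.mem_pyRange_one.mpr ⟨by omega, by omega⟩
  have hcast1 : (k : Int) - 1 = ((k - 1 : Nat) : Int) := by omega
  have hg1 : PySem.List.pyGetD L (k : Int) "" = pvAt L k := by
    rw [pvAt_pyGetD L _ (by omega)]; simp
  have hg2 : PySem.List.pyGetD L ((k : Int) - 1) "" = pvAt L (k - 1) := by
    rw [hcast1, pvAt_pyGetD L _ (by omega)]; simp
  have hcond : (PySem.List.pyGetD L (k : Int) "" == PySem.List.pyGetD L ((k : Int)-1) ""
      && PySem.Str.isIn "B-" (PySem.List.pyGetD L (k : Int) "")) = true := by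
    rw [Bool.and_eq_true]
    exact ⟨beq_iff_eq.mpr (by rw [hg1, hg2]; exact hkeq), by rw [hg1]; exact hkin⟩
  refine ⟨((k : Int) - 1, pvAInner L (PySem.List.pyGetD L (k : Int) "") (k : Int)
      (PySem.List.pyRange (k : Int) (L.length : Int) 1)), ?_, rfl, ?_⟩
  · rw [pvAPhase1_eq]
    exact List.mem_map.mpr ⟨(k : Int), List.mem_filter.mpr ⟨hc1, hcond⟩, rfl⟩
  · rcases pvAInner_spec L (PySem.List.pyGetD L (k : Int) "") ((L.length : Int) - (k : Int)).toNat
      (k : Int) (k : Int) rfl with h0 | ⟨h1, _, _⟩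
    · rw [h0]
    · exact h1

-- the write loop
lemma pvASetRange_length (v : String) (js : List Int) (cur : List String) :
    (pvASetRange v js cur).length = cur.length := by
  induction js generalizing cur with
  | nil => rfl
  | cons j js ih => simp [pvASetRange, List.foldl_cons] at ih ⊢; rw [ih, PySem.List.length_pySetD]

lemma pvASetRange_getD (v : String) : ∀ (m : Nat) (a b : Int) (cur : List String),
    (b - a).toNat = m → 0 ≤ a → b ≤ (cur.length : Int) →
    ∀ k : Nat, pvAt (pvASetRange v (PySem.List.pyRange a b 1) cur) k
      = if a ≤ (k : Int) ∧ (k : Int) < b then v else pvAt cur k := by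
  intro m
  induction m with
  | zero =>
    intro a b cur hm ha hb k
    rw [PySem.List.pyRange_one_eq_nil (by omega)]
    rw [if_neg (by omega)]
    rfl
  | succ m ih =>
    intro a b cur hm ha hb k
    rw [PySem.List.pyRange_one_cons (by omega)]
    have hstep : pvASetRange v (a :: PySem.List.pyRange (a + 1) b 1) cur
        = pvASetRange v (PySem.List.pyRange (a + 1) b 1) (PySem.List.pySetD cur a v) := rfl
    rw [hstep, ih (a + 1) b _ (by omega) (by omega) (by rw [PySem.List.length_pySetD]; exact hb) k]
    have hacast : ((a.toNat : Int)) = a := Int.toNat_of_nonneg ha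
    have hset : pvAt (PySem.List.pySetD cur a v) k = if k = a.toNat then v else pvAt cur k := by
      have hps := PySem.List.pyGetD_pySetD_natCast cur a.toNat k v "" (by omega)
      rw [hacast] at hps
      simp only [PySem.List.pyGetD_natCast] at hps
      simpa [pvAt] using hps
    rw [hset]
    by_cases h1 : (a + 1 : Int) ≤ (k : Int) ∧ (k : Int) < b
    · rw [if_pos h1, if_pos (by omega)]
    · rw [if_neg h1]
      by_cases h2 : k = a.toNat
      · rw [if_pos h2, if_pos (by omega)]
      · rw [if_neg h2, if_neg (by omega)]


lemma pvRewCore_eq_two {y : String} (h : (PySem.Chars.splitOn y.toList ['-']).length = 2) :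
    pvRewCore y = String.ofList (['I', '-'] ++ (PySem.Chars.splitOn y.toList ['-']).getD 1 []) := by
  obtain ⟨a, b, hab⟩ := List.length_eq_two.mp h
  simp [pvRewCore, hab, PySem.Chars.join, List.intercalate]

lemma pvRewCore_eq_three {y : String} (h : (PySem.Chars.splitOn y.toList ['-']).length = 3) :
    pvRewCore y = String.ofList (['I', '-'] ++ (PySem.Chars.splitOn y.toList ['-']).getD 1 []
      ++ ['-'] ++ (PySem.Chars.splitOn y.toList ['-']).getD 2 []) := by
  obtain ⟨a, b, c, habc⟩ := List.length_eq_three.mp h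
  simp [pvRewCore, habc, PySem.Chars.join, List.intercalate, List.intersperse]

-- what the current value at a run start looks like to split(): same shape as the original
lemma pvTemp_facts {y x : String} (hx : x = y ∨ (pvGate y ∧ x = pvRewCore y)) :
    (PySem.Chars.splitOn x.toList ['-']).length = (PySem.Chars.splitOn y.toList ['-']).length
    ∧ (PySem.Chars.splitOn x.toList ['-']).getD 1 [] = (PySem.Chars.splitOn y.toList ['-']).getD 1 []
    ∧ (PySem.Chars.splitOn x.toList ['-']).getD 2 [] = (PySem.Chars.splitOn y.toList ['-']).getD 2 [] := by
  rcases hx with rfl | ⟨hg, rfl⟩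
  · exact ⟨rfl, rfl, rfl⟩
  · rw [pvSplit_rewCore hg]
    rcases hg with h2 | h3
    · obtain ⟨a, b, hab⟩ := List.length_eq_two.mp h2
      rw [hab]; simp
    · obtain ⟨a, b, c, habc⟩ := List.length_eq_three.mp h3
      rw [habc]; simp

-- a position strictly inside a collected interval is a hit and carries the run's label
lemma pvCover_hit (L : List String) (iv : Int × Int) (hiv : pvIvProps L iv) (k : Nat)
    (hk : k < L.length) (h1 : iv.1 + 1 ≤ (k : Int)) (h2 : (k : Int) ≤ iv.2) :
    pvAt L k = pvAt L iv.1.toNat ∧ pvHit L k := by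
  obtain ⟨hs0, hs12, hs2n, hP2, hP3⟩ := hiv
  have heqk : pvAt L k = pvAt L iv.1.toNat := by
    have := hP2 (k : Int) (by omega) h2
    rw [pvAt_pyGetD L (k : Int) (by omega), pvAt_pyGetD L iv.1 hs0] at this
    simpa using this
  have hkpos : 0 < k := by omega
  have heqk1 : pvAt L (k - 1) = pvAt L iv.1.toNat := by
    have hc : ((k - 1 : Nat) : Int) = (k : Int) - 1 := by omega
    have := hP2 ((k - 1 : Nat) : Int) (by omega) (by omega)
    rw [pvAt_pyGetD L _ (by omega), pvAt_pyGetD L iv.1 hs0] at this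
    simpa using this
  have hisin : PySem.Str.isIn "B-" (pvAt L k) = true := by
    rw [heqk, ← pvAt_pyGetD L iv.1 hs0]
    exact hP3
  exact ⟨heqk, hkpos, hk, by rw [heqk, heqk1], hisin⟩

-- safety invariant carried through phase 2
def pvSafe (L cur : List String) : Prop :=
  cur.length = L.length ∧ ∀ k : Nat, k < L.length →
    pvAt cur k = pvAt L k ∨ (pvHit L k ∧ pvGate (pvAt L k) ∧ pvAt cur k = pvRewCore (pvAt L k))

-- one phase-2 step, pointwise
lemma pvStep_spec (L cur : List String) (iv : Int × Int) (hiv : pvIvProps L iv)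
    (hs : pvSafe L cur) :
    (pvAPhase2Step cur iv).length = cur.length
    ∧ ∀ k : Nat, k < L.length →
        ((iv.1 + 1 ≤ (k : Int) ∧ (k : Int) ≤ iv.2 ∧ pvGate (pvAt L iv.1.toNat)) →
            pvAt (pvAPhase2Step cur iv) k = pvRewCore (pvAt L k))
        ∧ (¬ (iv.1 + 1 ≤ (k : Int) ∧ (k : Int) ≤ iv.2 ∧ pvGate (pvAt L iv.1.toNat)) →
            pvAt (pvAPhase2Step cur iv) k = pvAt cur k) := by
  obtain ⟨hs0, hs12, hs2n, hP2, hP3⟩ := hiv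
  obtain ⟨hlen, hsafe⟩ := hs
  have hslt : iv.1.toNat < L.length := by omega
  have hcurs : PySem.List.pyGetD cur iv.1 "" = pvAt cur iv.1.toNat := by
    rw [pvAt_pyGetD cur iv.1 hs0]
  have hxy : pvAt cur iv.1.toNat = pvAt L iv.1.toNat
      ∨ (pvGate (pvAt L iv.1.toNat) ∧ pvAt cur iv.1.toNat = pvRewCore (pvAt L iv.1.toNat)) := by
    rcases hsafe iv.1.toNat hslt with h | ⟨_, hg, hr⟩
    · exact Or.inl h
    · exact Or.inr ⟨hg, hr⟩
  obtain ⟨hT1, hT2, hT3⟩ := pvTemp_facts hxy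
  have hPk : ∀ k : Nat, iv.1 + 1 ≤ (k : Int) → (k : Int) ≤ iv.2 → pvAt L k = pvAt L iv.1.toNat :=
    fun k hk1 hk2 => (pvCover_hit L iv ⟨hs0, hs12, hs2n, hP2, hP3⟩ k (by omega) hk1 hk2).1
  have hblen : (iv.2 + 1 : Int) ≤ (cur.length : Int) := by omega
  unfold pvAPhase2Step
  rw [hcurs]
  by_cases hg2 : (PySem.Chars.splitOn (pvAt L iv.1.toNat).toList ['-']).length = 2
  · rw [if_pos (by rw [hT1]; exact hg2)]
    have hv : String.ofList (['I', '-'] ++ (PySem.Chars.splitOn (pvAt cur iv.1.toNat).toList ['-']).getD 1 [])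
        = pvRewCore (pvAt L iv.1.toNat) := by
      rw [hT2, ← pvRewCore_eq_two hg2]
    refine ⟨pvASetRange_length _ _ _, fun k hkn => ?_⟩
    have hrng := pvASetRange_getD
      (String.ofList (['I', '-'] ++ (PySem.Chars.splitOn (pvAt cur iv.1.toNat).toList ['-']).getD 1 []))
      ((iv.2 + 1) - (iv.1 + 1)).toNat (iv.1 + 1) (iv.2 + 1) cur rfl
      (by omega) hblen k
    refine ⟨fun hc => ?_, fun hn => ?_⟩
    · rw [hrng, if_pos ⟨hc.1, by omega⟩, hv, hPk k hc.1 hc.2.1]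
    · rw [hrng, if_neg (fun hh => hn ⟨hh.1, by omega, Or.inl hg2⟩)]
  · by_cases hg3 : (PySem.Chars.splitOn (pvAt L iv.1.toNat).toList ['-']).length = 3
    · rw [if_neg (by rw [hT1]; exact hg2), if_pos (by rw [hT1]; exact hg3)]
      have hv : String.ofList (['I', '-'] ++ (PySem.Chars.splitOn (pvAt cur iv.1.toNat).toList ['-']).getD 1 []
          ++ ['-'] ++ (PySem.Chars.splitOn (pvAt cur iv.1.toNat).toList ['-']).getD 2 [])
          = pvRewCore (pvAt L iv.1.toNat) := by
        rw [hT2, hT3, ← pvRewCore_eq_three hg3]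
      refine ⟨pvASetRange_length _ _ _, fun k hkn => ?_⟩
      have hrng := pvASetRange_getD
        (String.ofList (['I', '-'] ++ (PySem.Chars.splitOn (pvAt cur iv.1.toNat).toList ['-']).getD 1 []
          ++ ['-'] ++ (PySem.Chars.splitOn (pvAt cur iv.1.toNat).toList ['-']).getD 2 []))
        ((iv.2 + 1) - (iv.1 + 1)).toNat (iv.1 + 1) (iv.2 + 1) cur rfl
        (by omega) hblen k
      refine ⟨fun hc => ?_, fun hn => ?_⟩
      · rw [hrng, if_pos ⟨hc.1, by omega⟩, hv, hPk k hc.1 hc.2.1]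
      · rw [hrng, if_neg (fun hh => hn ⟨hh.1, by omega, Or.inr hg3⟩)]
    · rw [if_neg (by rw [hT1]; exact hg2), if_neg (by rw [hT1]; exact hg3)]
      exact ⟨rfl, fun k hkn =>
        ⟨fun hc => absurd hc.2.2 (by rintro (h | h) <;> [exact hg2 h; exact hg3 h]),
         fun _ => rfl⟩⟩

-- a position covered (with open gate) by an interval of J
def pvCov (L : List String) (J : List (Int × Int)) (k : Nat) : Prop :=
  ∃ iv ∈ J, iv.1 + 1 ≤ (k : Int) ∧ (k : Int) ≤ iv.2 ∧ pvGate (pvAt L iv.1.toNat)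

-- the whole phase-2 fold, pointwise
lemma pvFold_spec (L : List String) : ∀ (J : List (Int × Int)), (∀ iv ∈ J, pvIvProps L iv) →
    ∀ cur, pvSafe L cur →
    (J.foldl pvAPhase2Step cur).length = L.length
    ∧ ∀ k : Nat, k < L.length →
        (pvCov L J k → pvAt (J.foldl pvAPhase2Step cur) k = pvRewCore (pvAt L k))
        ∧ (¬ pvCov L J k → pvAt (J.foldl pvAPhase2Step cur) k = pvAt cur k) := by
  intro J
  induction J with
  | nil =>
    intro hprops cur hs
    exact ⟨hs.1, fun k hk => ⟨fun hc => absurd hc (by rintro ⟨iv, hm, -⟩; simp at hm),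
      fun _ => rfl⟩⟩
  | cons iv rest ih =>
    intro hprops cur hs
    have hiv := hprops iv List.mem_cons_self
    have hstep := pvStep_spec L cur iv hiv hs
    have hs1 : pvSafe L (pvAPhase2Step cur iv) := by
      refine ⟨hstep.1.trans hs.1, fun k hk => ?_⟩
      rcases Classical.em (iv.1 + 1 ≤ (k : Int) ∧ (k : Int) ≤ iv.2 ∧ pvGate (pvAt L iv.1.toNat))
        with hc | hc
      · obtain ⟨heqk, hhit⟩ := pvCover_hit L iv hiv k hk hc.1 hc.2.1
        exact Or.inr ⟨hhit, by rw [heqk]; exact hc.2.2, (hstep.2 k hk).1 hc⟩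
      · rw [(hstep.2 k hk).2 hc]
        exact hs.2 k hk
    have hrest := ih (fun iv' h' => hprops iv' (List.mem_cons_of_mem _ h'))
      (pvAPhase2Step cur iv) hs1
    rw [List.foldl_cons]
    refine ⟨hrest.1, fun k hk => ⟨fun hcov => ?_, fun hncov => ?_⟩⟩
    · obtain ⟨iv', hm, hc⟩ := hcov
      rcases List.mem_cons.mp hm with rfl | hm'
      · rcases Classical.em (pvCov L rest k) with hr | hr
        · exact (hrest.2 k hk).1 hr
        · rw [(hrest.2 k hk).2 hr]
          exact (hstep.2 k hk).1 hc
      · exact (hrest.2 k hk).1 ⟨iv', hm', hc⟩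
    · have hniv : ¬ (iv.1 + 1 ≤ (k : Int) ∧ (k : Int) ≤ iv.2 ∧ pvGate (pvAt L iv.1.toNat)) :=
        fun hc => hncov ⟨iv, List.mem_cons_self, hc⟩
      have hnr : ¬ pvCov L rest k := fun ⟨iv', hm', hc'⟩ =>
        hncov ⟨iv', List.mem_cons_of_mem _ hm', hc'⟩
      rw [(hrest.2 k hk).2 hnr, (hstep.2 k hk).2 hniv]

lemma pvCov_iff (L : List String) (k : Nat) (hk : k < L.length) :
    pvCov L (pvAPhase1 L) k ↔ (pvHit L k ∧ pvGate (pvAt L k)) := by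
  constructor
  · rintro ⟨iv, hm, h1, h2, hg⟩
    have hiv := pvAPhase1_props L iv hm
    obtain ⟨heqk, hhit⟩ := pvCover_hit L iv hiv k hk h1 h2
    exact ⟨hhit, by rw [heqk]; exact hg⟩
  · rintro ⟨hhit, hg⟩
    obtain ⟨iv, hm, hseq, hke⟩ := pvAPhase1_cover L k hhit
    refine ⟨iv, hm, by omega, hke, ?_⟩
    have hkpos : 0 < k := hhit.1
    have htn : iv.1.toNat = k - 1 := by omega
    rw [htn, ← hhit.2.2.1]
    exact hg

lemma pvA_eq_fold (L : List String) :
    processing_general_format_bxx L = (pvAPhase1 L).foldl pvAPhase2Step L := by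
  by_cases h : 0 < (pvAPhase1 L).length
  · simp [processing_general_format_bxx, h]
  · have hnil : pvAPhase1 L = [] := List.eq_nil_of_length_eq_zero (by omega)
    simp [processing_general_format_bxx, hnil]

-- ===== VERDICT (by name: the statement is the Claim_ definition above) =====
theorem processing_general_format_bxx_spec : Claim_equal_processing_general_format_bxx := by
  intro L _
  unfold Spec_processing_general_format_bxx
  have hsafe0 : pvSafe L L := ⟨rfl, fun k _ => Or.inl rfl⟩
  have hfold := pvFold_spec L (pvAPhase1 L) (pvAPhase1_props L) L hsafe0
  rw [pvA_eq_fold]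
  have hlen : ((pvAPhase1 L).foldl pvAPhase2Step L).length
      = (processing_general_format_bxx_alt L).length := by
    rw [hfold.1, pvAlt_length]
  apply List.ext_getElem hlen
  intro i h1 h2
  have hiL : i < L.length := by rw [hfold.1] at h1; exact h1
  rw [← List.getD_eq_getElem _ "" h1, ← List.getD_eq_getElem _ "" h2]
  show pvAt ((pvAPhase1 L).foldl pvAPhase2Step L) i = pvAt (processing_general_format_bxx_alt L) i
  have halt := pvAlt_getD L i hiL
  rcases Classical.em (pvHit L i) with hhit | hhit
  · rcases Classical.em (pvGate (pvAt L i)) with hgt | hgt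
    · rw [(hfold.2 i hiL).1 ((pvCov_iff L i hiL).mpr ⟨hhit, hgt⟩), halt.1 hhit hgt]
    · rw [(hfold.2 i hiL).2 (fun hc => hgt ((pvCov_iff L i hiL).mp hc).2), halt.2.1 hhit hgt]
  · rw [(hfold.2 i hiL).2 (fun hc => hhit ((pvCov_iff L i hiL).mp hc).1), halt.2.2 hhit]
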